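-- pv_equiv track=rewrite | github.com/199-biotechnologies/sequence-optimiser | public/tools/fst344_optimization.py | optimize_sequence
-- ===== SOURCE A (Python) =====
-- OPTIMAL_CODONS = {
--     'A': ['GCC', 'GCT'],  # Alanine
--     'R': ['AGA', 'AGA'],  # Arginine (avoid CGC)
--     'N': ['AAC'],         # Asparagine
--     'D': ['GAC'],         # Aspartic acid
--     'C': ['TGC'],         # Cysteine
--     'Q': ['CAG'],         # Glutamine
--     'E': ['GAG'],         # Glutamic acid
--     'G': ['GGA', 'GGT'],  # Glycine (avoid GGC when possible)
--     'H': ['CAC'],         # Histidine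
--     'I': ['ATC'],         # Isoleucine
--     'L': ['CTG', 'CTC'],  # Leucine
--     'K': ['AAG'],         # Lysine
--     'M': ['ATG'],         # Methionine (start)
--     'F': ['TTC'],         # Phenylalanine
--     'P': ['CCC', 'CCT'],  # Proline (avoid CCG)
--     'S': ['AGC', 'TCC'],  # Serine
--     'T': ['ACC'],         # Threonine
--     'W': ['TGG'],         # Tryptophan
--     'Y': ['TAC'],         # Tyrosine
--     'V': ['GTG', 'GTC'],  # Valine
--     '*': ['TGA']          # Stop codon
-- }
--
-- GENETIC_CODE = {
--     'TTT': 'F', 'TTC': 'F', 'TTA': 'L', 'TTG': 'L',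
--     'TCT': 'S', 'TCC': 'S', 'TCA': 'S', 'TCG': 'S',
--     'TAT': 'Y', 'TAC': 'Y', 'TAA': '*', 'TAG': '*',
--     'TGT': 'C', 'TGC': 'C', 'TGA': '*', 'TGG': 'W',
--     'CTT': 'L', 'CTC': 'L', 'CTA': 'L', 'CTG': 'L',
--     'CCT': 'P', 'CCC': 'P', 'CCA': 'P', 'CCG': 'P',
--     'CAT': 'H', 'CAC': 'H', 'CAA': 'Q', 'CAG': 'Q',
--     'CGT': 'R', 'CGC': 'R', 'CGA': 'R', 'CGG': 'R',
--     'ATT': 'I', 'ATC': 'I', 'ATA': 'I', 'ATG': 'M',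
--     'ACT': 'T', 'ACC': 'T', 'ACA': 'T', 'ACG': 'T',
--     'AAT': 'N', 'AAC': 'N', 'AAA': 'K', 'AAG': 'K',
--     'AGT': 'S', 'AGC': 'S', 'AGA': 'R', 'AGG': 'R',
--     'GTT': 'V', 'GTC': 'V', 'GTA': 'V', 'GTG': 'V',
--     'GCT': 'A', 'GCC': 'A', 'GCA': 'A', 'GCG': 'A',
--     'GAT': 'D', 'GAC': 'D', 'GAA': 'E', 'GAG': 'E',
--     'GGT': 'G', 'GGC': 'G', 'GGA': 'G', 'GGG': 'G'
-- }
--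
-- def translate_dna(sequence):
--     """Translate DNA sequence to protein"""
--     protein = ""
--     for i in range(0, len(sequence), 3):
--         codon = sequence[i:i+3]
--         if len(codon) == 3:
--             protein += GENETIC_CODE.get(codon, 'X')
--     return protein
--
-- def optimize_codon(amino_acid, avoid_cpg=True, last_two_bases=""):
--     """Select optimal codon for amino acid avoiding CpG dinucleotides"""
--     candidates = OPTIMAL_CODONS.get(amino_acid, ['XXX'])
--
--     if avoid_cpg:
--         # Filter out codons that create CpG dinucleotides
--         safe_candidates = []
--         for codon in candidates:
--             # Check if codon itself contains CG
--             if 'CG' in codon: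
--                 continue
--             # Check if codon creates CpG with previous bases
--             if last_two_bases and last_two_bases.endswith('C') and codon.startswith('G'):
--                 continue
--             safe_candidates.append(codon)
--
--         # Use safe candidates if available
--         if safe_candidates:
--             candidates = safe_candidates
--
--     # Return best candidate
--     return candidates[0] if candidates else 'XXX'
--
-- def optimize_sequence(dna_sequence):
--     """Optimize entire DNA sequence"""
--     # Translate to protein
--     protein = translate_dna(dna_sequence)
--
--     # Re-encode with optimal codons
--     optimized_dna = ""
--     for i, aa in enumerate(protein):
--         if aa != 'X':
--             # Get last two bases to avoid CpG
--             last_two = optimized_dna[-2:] if len(optimized_dna) >= 2 else ""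
--             codon = optimize_codon(aa, avoid_cpg=True, last_two_bases=last_two)
--             optimized_dna += codon
--
--     return optimized_dna, protein
-- ===== SOURCE B (Python) =====
-- AA_TABLE = "FFLLSSSSYY**CC*WLLLLPPPPHHQQRRRRIIIMTTTTNNKKSSRRVVVVAAAADDEEGGGG"
--
-- BASE = {'T': 0, 'C': 1, 'A': 2, 'G': 3}
--
-- # For every amino acid the CpG filter in A never changes the choice (every
-- # alternative to a G-starting preferred codon also starts with G, so the
-- # fallback restores the full list), hence each amino acid has ONE fixed codon.
-- BEST = {
--     'F': 'TTC', 'L': 'CTG', 'S': 'AGC', 'Y': 'TAC', '*': 'TGA', 'C': 'TGC',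
--     'W': 'TGG', 'P': 'CCC', 'H': 'CAC', 'Q': 'CAG', 'R': 'AGA', 'I': 'ATC',
--     'M': 'ATG', 'T': 'ACC', 'N': 'AAC', 'K': 'AAG', 'V': 'GTG', 'A': 'GCC',
--     'D': 'GAC', 'E': 'GAG', 'G': 'GGA',
-- }
--
--
-- def optimize_sequence(dna_sequence):
--     """Single pass over base triples; positional genetic-code table and a
--     precomputed one-codon-per-amino-acid table (the CpG filter is vacuous)."""
--     opt = []
--     prot = []
--     it = iter(dna_sequence)
--     for b0, b1, b2 in zip(it, it, it):
--         i0 = BASE.get(b0, -1)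
--         i1 = BASE.get(b1, -1)
--         i2 = BASE.get(b2, -1)
--         aa = AA_TABLE[16 * i0 + 4 * i1 + i2] if i0 >= 0 and i1 >= 0 and i2 >= 0 else 'X'
--         prot.append(aa)
--         if aa != 'X':
--             opt.append(BEST[aa])
--     return "".join(opt), "".join(prot)
-- ===== Notes on version B (the rewrite author's own statement) =====
-- stated objective: alternative
-- what changed: A translates via a 64-entry codon dict into a protein string and then re-encodes it in a second loop whose optimize_codon rebuilds and filters a candidate list per amino acid; B makes one pass over base triples, decodes each through a positional index into a 64-character amino-acid table, and emits a fixed precomputed codon per amino acid after proving the CpG filter never alters the choice (every G-starting preferred codon has only G-starting alternatives, so the fallback restores the full list).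
import Mathlib
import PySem

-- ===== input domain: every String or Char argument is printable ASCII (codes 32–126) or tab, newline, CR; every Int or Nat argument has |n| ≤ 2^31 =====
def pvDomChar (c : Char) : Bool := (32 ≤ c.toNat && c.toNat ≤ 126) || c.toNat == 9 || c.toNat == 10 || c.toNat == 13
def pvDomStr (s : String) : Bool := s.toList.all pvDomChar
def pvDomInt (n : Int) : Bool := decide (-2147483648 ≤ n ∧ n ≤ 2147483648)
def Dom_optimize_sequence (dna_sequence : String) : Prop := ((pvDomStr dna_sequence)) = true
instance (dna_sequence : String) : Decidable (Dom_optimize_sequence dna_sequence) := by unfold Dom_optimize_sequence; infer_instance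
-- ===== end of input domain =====

-- B replaces A's translate-then-re-encode passes (64-entry codon dict, then a per-amino-acid
-- candidate-list filter) by one recursion over base triples with a positional 64-character
-- amino-acid table and one fixed precomputed codon per amino acid (objective: alternative).


-- ===== PORT A =====
def OPTIMAL_CODONS : PySem.Dict Char (List String) := PySem.Dict.ofList
  [('A', ["GCC", "GCT"]), ('R', ["AGA", "AGA"]), ('N', ["AAC"]), ('D', ["GAC"]),
   ('C', ["TGC"]), ('Q', ["CAG"]), ('E', ["GAG"]), ('G', ["GGA", "GGT"]),
   ('H', ["CAC"]), ('I', ["ATC"]), ('L', ["CTG", "CTC"]), ('K', ["AAG"]),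
   ('M', ["ATG"]), ('F', ["TTC"]), ('P', ["CCC", "CCT"]), ('S', ["AGC", "TCC"]),
   ('T', ["ACC"]), ('W', ["TGG"]), ('Y', ["TAC"]), ('V', ["GTG", "GTC"]), ('*', ["TGA"])]

def GENETIC_CODE : PySem.Dict String Char := PySem.Dict.ofList
  [("TTT", 'F'), ("TTC", 'F'), ("TTA", 'L'), ("TTG", 'L'),
   ("TCT", 'S'), ("TCC", 'S'), ("TCA", 'S'), ("TCG", 'S'),
   ("TAT", 'Y'), ("TAC", 'Y'), ("TAA", '*'), ("TAG", '*'),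
   ("TGT", 'C'), ("TGC", 'C'), ("TGA", '*'), ("TGG", 'W'),
   ("CTT", 'L'), ("CTC", 'L'), ("CTA", 'L'), ("CTG", 'L'),
   ("CCT", 'P'), ("CCC", 'P'), ("CCA", 'P'), ("CCG", 'P'),
   ("CAT", 'H'), ("CAC", 'H'), ("CAA", 'Q'), ("CAG", 'Q'),
   ("CGT", 'R'), ("CGC", 'R'), ("CGA", 'R'), ("CGG", 'R'),
   ("ATT", 'I'), ("ATC", 'I'), ("ATA", 'I'), ("ATG", 'M'),
   ("ACT", 'T'), ("ACC", 'T'), ("ACA", 'T'), ("ACG", 'T'),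
   ("AAT", 'N'), ("AAC", 'N'), ("AAA", 'K'), ("AAG", 'K'),
   ("AGT", 'S'), ("AGC", 'S'), ("AGA", 'R'), ("AGG", 'R'),
   ("GTT", 'V'), ("GTC", 'V'), ("GTA", 'V'), ("GTG", 'V'),
   ("GCT", 'A'), ("GCC", 'A'), ("GCA", 'A'), ("GCG", 'A'),
   ("GAT", 'D'), ("GAC", 'D'), ("GAA", 'E'), ("GAG", 'E'),
   ("GGT", 'G'), ("GGC", 'G'), ("GGA", 'G'), ("GGG", 'G')]

def translate_dna (sequence : String) : String :=
  (PySem.List.pyRange 0 (PySem.Str.len sequence) 3).foldl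
    (fun protein i =>
      let codon := PySem.Str.slice sequence (some i) (some (i + 3))
      if PySem.Str.len codon = 3 then protein.push (PySem.Dict.getD GENETIC_CODE codon 'X')
      else protein) ""

def optimize_codon (amino_acid : Char) (avoid_cpg : Bool) (last_two_bases : String) : String :=
  let candidates := PySem.Dict.getD OPTIMAL_CODONS amino_acid ["XXX"]
  let candidates :=
    if avoid_cpg then
      let safe := candidates.foldl
        (fun safe codon =>
          if PySem.Str.isIn "CG" codon then safe
          else if (!(last_two_bases == "")) && PySem.Str.endswith last_two_bases "C"
                    && PySem.Str.startswith codon "G" then safe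
          else safe ++ [codon]) []
      if safe ≠ [] then safe else candidates
    else candidates
  match candidates with
  | c :: _ => c
  | [] => "XXX"

def optimize_sequence (dna_sequence : String) : String × String :=
  let protein := translate_dna dna_sequence
  let optimized := (PySem.List.enumerate protein.toList 0).foldl
    (fun optimized p =>
      if p.2 ≠ 'X' then
        let last_two := if 2 ≤ PySem.Str.len optimized
                        then PySem.Str.slice optimized (some (-2)) none else ""
        optimized ++ optimize_codon p.2 true last_two
      else optimized) ""
  (optimized, protein)

-- ===== PORT B =====
def AA_TABLE : String := "FFLLSSSSYY**CC*WLLLLPPPPHHQQRRRRIIIMTTTTNNKKSSRRVVVVAAAADDEEGGGG"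

def BASE : PySem.Dict Char Int := PySem.Dict.ofList [('T', 0), ('C', 1), ('A', 2), ('G', 3)]

def BEST : PySem.Dict Char String := PySem.Dict.ofList
  [('F', "TTC"), ('L', "CTG"), ('S', "AGC"), ('Y', "TAC"), ('*', "TGA"), ('C', "TGC"),
   ('W', "TGG"), ('P', "CCC"), ('H', "CAC"), ('Q', "CAG"), ('R', "AGA"), ('I', "ATC"),
   ('M', "ATG"), ('T', "ACC"), ('N', "AAC"), ('K', "AAG"), ('V', "GTG"), ('A', "GCC"),
   ('D', "GAC"), ('E', "GAG"), ('G', "GGA")]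

-- the for-loop over zip(it, it, it): structural recursion consuming three bases at a time
def optSeqGo : List Char → List String → List Char → List String × List Char
  | b0 :: b1 :: b2 :: rest, opt, prot =>
      let i0 := PySem.Dict.getD BASE b0 (-1)
      let i1 := PySem.Dict.getD BASE b1 (-1)
      let i2 := PySem.Dict.getD BASE b2 (-1)
      let aa := if 0 ≤ i0 ∧ 0 ≤ i1 ∧ 0 ≤ i2
                then (PySem.Str.pyGet? AA_TABLE (16 * i0 + 4 * i1 + i2)).getD 'X'
                else 'X'
      optSeqGo rest
        (if aa ≠ 'X' then opt ++ [PySem.Dict.getD BEST aa "XXX"] else opt)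
        (prot ++ [aa])
  | _, opt, prot => (opt, prot)

def optimize_sequence_alt (dna_sequence : String) : String × String :=
  let r := optSeqGo dna_sequence.toList [] []
  (PySem.Str.join "" r.1, String.ofList r.2)

-- ===== PRECONDITION & SPEC =====
def Spec_optimize_sequence (dna_sequence : String) (out : String × String) : Prop := out = optimize_sequence_alt dna_sequence
instance (dna_sequence : String) (out : String × String) : Decidable (Spec_optimize_sequence dna_sequence out) := by unfold Spec_optimize_sequence; infer_instance

-- ===== CLAIM (what is proved, stated in full; the proofs are below) =====
def Claim_equal_optimize_sequence : Prop := ∀ (dna_sequence : String), Dom_optimize_sequence dna_sequence → Spec_optimize_sequence dna_sequence (optimize_sequence dna_sequence)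

-- ===== LEMMAS AND PROOFS =====

-- B's per-triple amino acid (same lets as the matching arm of optSeqGo)
def decode3 (b0 b1 b2 : Char) : Char :=
  let i0 := PySem.Dict.getD BASE b0 (-1)
  let i1 := PySem.Dict.getD BASE b1 (-1)
  let i2 := PySem.Dict.getD BASE b2 (-1)
  if 0 ≤ i0 ∧ 0 ≤ i1 ∧ 0 ≤ i2
  then (PySem.Str.pyGet? AA_TABLE (16 * i0 + 4 * i1 + i2)).getD 'X'
  else 'X'

-- the protein of a char list, three bases at a time
def trans3 : List Char → List Char
  | b0 :: b1 :: b2 :: rest => decode3 b0 b1 b2 :: trans3 rest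
  | _ => []

-- B's list of emitted codons
def encList (l : List Char) : List String :=
  l.filterMap (fun aa => if aa = 'X' then none else some (PySem.Dict.getD BEST aa "XXX"))

-- A's translate step and re-encode step, named
def stepT (s : String) (protein : String) (i : Int) : String :=
  let codon := PySem.Str.slice s (some i) (some (i + 3))
  if PySem.Str.len codon = 3 then protein.push (PySem.Dict.getD GENETIC_CODE codon 'X')
  else protein

def gA (o : String) (c : Char) : String :=
  if c ≠ 'X' then
    let last_two := if 2 ≤ PySem.Str.len o then PySem.Str.slice o (some (-2)) none else ""
    o ++ optimize_codon c true last_two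
  else o

def aaOf (s : String) (i : Int) : Option Char :=
  let codon := PySem.Str.slice s (some i) (some (i + 3))
  if PySem.Str.len codon = 3 then some (PySem.Dict.getD GENETIC_CODE codon 'X') else none

def aas (s : String) (R : List Int) : List Char := R.filterMap (aaOf s)

def AACHARS : List Char :=
  ['F', 'L', 'S', 'Y', '*', 'C', 'W', 'P', 'H', 'Q', 'R', 'I', 'M', 'T', 'N', 'K', 'V', 'A', 'D', 'E', 'G']

lemma str_ext {a b : String} (h : a.toList = b.toList) : a = b := by
  have := congrArg String.ofList h
  rwa [String.ofList_toList, String.ofList_toList] at this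

lemma foldl_enum_snd {α β : Type} (h : β → α → β) (l : List α) (st : Int) (o : β) :
    (PySem.List.enumerate l st).foldl (fun acc p => h acc p.2) o = l.foldl h o := by
  conv_rhs => rw [← PySem.List.map_snd_enumerate l st]
  rw [List.foldl_map]

lemma foldl_translate (s : String) (R : List Int) : ∀ (p : String),
    (R.foldl (stepT s) p).toList = p.toList ++ aas s R := by
  induction R with
  | nil => simp [aas]
  | cons i R ih =>
    intro p
    simp only [List.foldl_cons]
    rw [ih]
    by_cases h3 : (PySem.List.slice s.toList (some i) (some (i + 3))).length = 3
    · have h3i : ((PySem.List.slice s.toList (some i) (some (i + 3))).length : Int) = 3 := by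
        exact_mod_cast h3
      simp [stepT, aas, aaOf, h3i, String.toList_push]
    · have h3i : ¬ ((PySem.List.slice s.toList (some i) (some (i + 3))).length : Int) = 3 := by
        exact_mod_cast h3
      simp [stepT, aas, aaOf, h3i]

-- values of GENETIC_CODE are amino-acid letters
set_option maxRecDepth 8192 in
lemma val_mem (codon : String) (v : Char) (h : PySem.Dict.get? GENETIC_CODE codon = some v) :
    v ∈ AACHARS := by
  have hmem := PySem.Dict.mem_items_of_get?_eq_some _ h
  have hall : ∀ p ∈ GENETIC_CODE.items, p.2 ∈ AACHARS := by decide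
  exact hall _ hmem

-- keys of GENETIC_CODE consist of bases only
set_option maxRecDepth 8192 in
lemma key_chars (codon : String) (v : Char) (h : PySem.Dict.get? GENETIC_CODE codon = some v) :
    ∀ c ∈ codon.toList, c ∈ (['T', 'C', 'A', 'G'] : List Char) := by
  have hmem := PySem.Dict.mem_items_of_get?_eq_some _ h
  have hb : GENETIC_CODE.items.all
      (fun p => p.1.toList.all (fun c => (['T', 'C', 'A', 'G'] : List Char).contains c)) = true := by
    decide
  intro c hc
  have h1 := (List.all_eq_true.mp hb) _ hmem
  have h2 := (List.all_eq_true.mp h1) c hc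
  simpa using h2

lemma base_neg (c : Char) (h : c ∉ (['T', 'C', 'A', 'G'] : List Char)) :
    PySem.Dict.getD BASE c (-1) = -1 := by
  simp only [List.mem_cons, List.not_mem_nil, or_false, not_or] at h
  obtain ⟨h1, h2, h3, h4⟩ := h
  simp [BASE, PySem.Dict.ofList, PySem.Dict.update, PySem.Dict.getD_insert, h1, h2, h3, h4,
    PySem.Dict.getD_empty]

lemma decode3_bad (b0 b1 b2 : Char)
    (h : b0 ∉ (['T', 'C', 'A', 'G'] : List Char) ∨ b1 ∉ (['T', 'C', 'A', 'G'] : List Char)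
         ∨ b2 ∉ (['T', 'C', 'A', 'G'] : List Char)) :
    decode3 b0 b1 b2 = 'X' := by
  have hneg : ¬ (0 ≤ PySem.Dict.getD BASE b0 (-1) ∧ 0 ≤ PySem.Dict.getD BASE b1 (-1)
                 ∧ 0 ≤ PySem.Dict.getD BASE b2 (-1)) := by
    rintro ⟨c0, c1, c2⟩
    rcases h with h | h | h
    · rw [base_neg _ h] at c0; omega
    · rw [base_neg _ h] at c1; omega
    · rw [base_neg _ h] at c2; omega
  simp [decode3, hneg]

lemma genetic_bad (b0 b1 b2 : Char)
    (h : b0 ∉ (['T', 'C', 'A', 'G'] : List Char) ∨ b1 ∉ (['T', 'C', 'A', 'G'] : List Char)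
         ∨ b2 ∉ (['T', 'C', 'A', 'G'] : List Char)) :
    PySem.Dict.getD GENETIC_CODE (String.ofList [b0, b1, b2]) 'X' = 'X' := by
  cases hg : PySem.Dict.get? GENETIC_CODE (String.ofList [b0, b1, b2]) with
  | none => exact PySem.Dict.getD_of_get?_eq_none _ _ hg
  | some v =>
    exfalso
    have hk := key_chars _ _ hg
    rw [String.toList_ofList] at hk
    rcases h with h | h | h
    · exact h (hk _ (by simp))
    · exact h (hk _ (by simp))
    · exact h (hk _ (by simp))

-- B's decode agrees with A's dictionary lookup on every triple of characters
set_option maxRecDepth 8192 in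
lemma decode_eq (b0 b1 b2 : Char) :
    decode3 b0 b1 b2 = PySem.Dict.getD GENETIC_CODE (String.ofList [b0, b1, b2]) 'X' := by
  by_cases h0 : b0 ∈ (['T', 'C', 'A', 'G'] : List Char)
  · by_cases h1 : b1 ∈ (['T', 'C', 'A', 'G'] : List Char)
    · by_cases h2 : b2 ∈ (['T', 'C', 'A', 'G'] : List Char)
      · fin_cases h0 <;> fin_cases h1 <;> fin_cases h2 <;> decide
      · rw [decode3_bad _ _ _ (Or.inr (Or.inr h2)), genetic_bad _ _ _ (Or.inr (Or.inr h2))]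
    · rw [decode3_bad _ _ _ (Or.inr (Or.inl h1)), genetic_bad _ _ _ (Or.inr (Or.inl h1))]
  · rw [decode3_bad _ _ _ (Or.inl h0), genetic_bad _ _ _ (Or.inl h0)]

-- the CpG candidate filter never changes A's choice: one fixed codon per amino acid
lemma pick_const (aa : Char) (haa : aa ∈ AACHARS) (lt : String) :
    optimize_codon aa true lt = PySem.Dict.getD BEST aa "XXX" := by
  have haa' : aa ∈ (['F', 'L', 'S', 'Y', '*', 'C', 'W', 'P', 'H', 'Q', 'R', 'I', 'M', 'T', 'N',
      'K', 'V', 'A', 'D', 'E', 'G'] : List Char) := haa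
  unfold optimize_codon
  cases hb : ((!(lt == "")) && PySem.Str.endswith lt "C") with
  | false =>
    simp only [Bool.false_and]
    fin_cases haa' <;> decide
  | true =>
    simp only [Bool.true_and]
    fin_cases haa' <;> decide

lemma trans3_mem (cs : List Char) : ∀ aa ∈ trans3 cs, aa = 'X' ∨ aa ∈ AACHARS := by
  induction cs using trans3.induct with
  | case1 b0 b1 b2 rest ih =>
    intro aa hmem
    rw [trans3] at hmem
    rcases List.mem_cons.mp hmem with h | h
    · subst h
      rw [decode_eq]
      cases hg : PySem.Dict.get? GENETIC_CODE (String.ofList [b0, b1, b2]) with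
      | none => left; rw [PySem.Dict.getD_of_get?_eq_none _ _ hg]
      | some v => right; rw [PySem.Dict.getD_of_get?_eq_some _ _ hg]; exact val_mem _ _ hg
    · exact ih aa h
  | case2 t ht =>
    intro aa hmem
    exfalso
    rcases t with _ | ⟨a, _ | ⟨b, _ | ⟨c, r⟩⟩⟩
    · simp [trans3] at hmem
    · simp [trans3] at hmem
    · simp [trans3] at hmem
    · exact ht a b c r rfl

lemma join_empty_cons (a : List Char) (parts : List (List Char)) :
    PySem.Chars.join [] (a :: parts) = a ++ PySem.Chars.join [] parts := by
  cases parts with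
  | nil => simp [PySem.Chars.join_singleton, PySem.Chars.join_nil]
  | cons b r => rw [PySem.Chars.join_cons_cons]; simp

-- A's re-encode fold over amino acids produces exactly B's codon list, joined
lemma fold_gA (l : List Char) : ∀ (o : String), (∀ aa ∈ l, aa = 'X' ∨ aa ∈ AACHARS) →
    (l.foldl gA o).toList = o.toList ++ PySem.Chars.join [] ((encList l).map String.toList) := by
  induction l with
  | nil => intro o _; simp [encList, PySem.Chars.join_nil]
  | cons aa l ih =>
    intro o hmem
    by_cases hx : aa = 'X'
    · subst hx
      have h1 : gA o 'X' = o := by simp [gA]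
      simp only [List.foldl_cons, h1, encList, List.filterMap_cons]
      exact ih o (fun a ha => hmem a (List.mem_cons_of_mem _ ha))
    · have hok : aa ∈ AACHARS := (hmem aa (List.mem_cons_self ..)).resolve_left hx
      have h1 : gA o aa = o ++ PySem.Dict.getD BEST aa "XXX" := by
        simp only [gA, if_pos hx]
        rw [pick_const aa hok]
      simp only [List.foldl_cons, h1, encList, List.filterMap_cons, if_neg hx]
      rw [ih _ (fun a ha => hmem a (List.mem_cons_of_mem _ ha))]
      simp only [List.map_cons, join_empty_cons, String.toList_append, List.append_assoc]
      simp [encList]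

lemma encList_cons_X (l : List Char) : encList ('X' :: l) = encList l := by
  simp [encList]

-- B's recursion, characterised
lemma go_spec (cs : List Char) : ∀ (opt : List String) (prot : List Char),
    optSeqGo cs opt prot = (opt ++ encList (trans3 cs), prot ++ trans3 cs) := by
  induction cs using trans3.induct with
  | case1 b0 b1 b2 rest ih =>
    intro opt prot
    have hstep : optSeqGo (b0 :: b1 :: b2 :: rest) opt prot
        = optSeqGo rest
            (if decode3 b0 b1 b2 ≠ 'X' then opt ++ [PySem.Dict.getD BEST (decode3 b0 b1 b2) "XXX"]
             else opt)
            (prot ++ [decode3 b0 b1 b2]) := rfl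
    rw [hstep, ih, trans3]
    have henc : encList (decode3 b0 b1 b2 :: trans3 rest)
        = (if decode3 b0 b1 b2 = 'X' then [] else [PySem.Dict.getD BEST (decode3 b0 b1 b2) "XXX"])
          ++ encList (trans3 rest) := by
      simp only [encList, List.filterMap_cons]
      split_ifs <;> simp
    by_cases hx : decode3 b0 b1 b2 = 'X' <;> simp [hx, henc, encList_cons_X, List.append_assoc]
  | case2 t ht =>
    intro opt prot
    rcases t with _ | ⟨a, _ | ⟨b, _ | ⟨c, r⟩⟩⟩
    · simp [optSeqGo, trans3, encList]
    · simp [optSeqGo, trans3, encList]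
    · simp [optSeqGo, trans3, encList]
    · exact absurd rfl (fun h => ht a b c r h)

-- aaOf, restated on the list side
lemma aaOf_eq (s : String) (i : Int) :
    aaOf s i
      = (if ((PySem.List.slice s.toList (some i) (some (i + 3))).length : Int) = 3
         then some (PySem.Dict.getD GENETIC_CODE
                      (String.ofList (PySem.List.slice s.toList (some i) (some (i + 3)))) 'X')
         else none) := by
  simp [aaOf, PySem.Str.slice, PySem.Chars.slice_eq_listSlice, PySem.Str.len]

lemma aaOf_head (b0 b1 b2 : Char) (rest : List Char) :
    aaOf (String.ofList (b0 :: b1 :: b2 :: rest)) 0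
      = some (PySem.Dict.getD GENETIC_CODE (String.ofList [b0, b1, b2]) 'X') := by
  rw [aaOf_eq, String.toList_ofList]
  have hsl : PySem.List.slice (b0 :: b1 :: b2 :: rest) (some 0) (some (0 + 3)) = [b0, b1, b2] := by
    rw [PySem.List.slice_toNat _ le_rfl (by norm_num)]
    rfl
  rw [hsl]
  simp

lemma aaOf_short (cs : List Char) (h : cs.length < 3) :
    aaOf (String.ofList cs) 0 = none := by
  rw [aaOf_eq, String.toList_ofList]
  rw [PySem.List.slice_toNat _ le_rfl (by norm_num)]
  have hlen : (List.take (0 + 3 : Int).toNat (List.drop (0 : Int).toNat cs)).length ≠ 3 := by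
    simp [List.length_take]
    omega
  rw [if_neg (by exact_mod_cast hlen)]

lemma aaOf_shift (b0 b1 b2 : Char) (rest : List Char) (k : Nat) :
    aaOf (String.ofList (b0 :: b1 :: b2 :: rest)) (3 * (k : Int) + 3)
      = aaOf (String.ofList rest) (3 * (k : Int)) := by
  rw [aaOf_eq, aaOf_eq, String.toList_ofList, String.toList_ofList]
  rw [PySem.List.slice_toNat _ (by positivity) (by positivity),
      PySem.List.slice_toNat _ (by positivity) (by positivity)]
  have e1 : (3 * (k : Int) + 3).toNat = 3 * k + 3 := by omega
  have e2 : (3 * (k : Int) + 3 + 3).toNat = 3 * k + 6 := by omega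
  have e3 : (3 * (k : Int)).toNat = 3 * k := by omega
  rw [e1, e2, e3]
  have hdrop : List.drop (3 * k + 3) (b0 :: b1 :: b2 :: rest) = List.drop (3 * k) rest := by
    rw [Nat.add_comm (3 * k) 3, ← List.drop_drop]
    rfl
  rw [hdrop]
  have ht1 : 3 * k + 6 - (3 * k + 3) = 3 := by omega
  have ht2 : 3 * k + 3 - 3 * k = 3 := by omega
  rw [ht1, ht2]

-- A's protein, three bases at a time
lemma aas_eq (cs : List Char) :
    aas (String.ofList cs) (PySem.List.pyRange 0 (cs.length : Int) 3) = trans3 cs := by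
  induction cs using trans3.induct with
  | case1 b0 b1 b2 rest ih =>
    rw [aas, PySem.List.pyRange_of_pos 0 _ (by norm_num), List.filterMap_map] at ih ⊢
    have hc : (if (0 : Int) < (((b0 :: b1 :: b2 :: rest).length : Nat) : Int)
                then (((((b0 :: b1 :: b2 :: rest).length : Nat) : Int) - 0 + 3 - 1) / 3).toNat else 0)
        = (if (0 : Int) < ((rest.length : Nat) : Int)
            then ((((rest.length : Nat) : Int) - 0 + 3 - 1) / 3).toNat else 0) + 1 := by
      simp only [List.length_cons]
      push_cast
      split_ifs <;> omega
    rw [hc, List.range_succ_eq_map]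
    have hhead : (aaOf (String.ofList (b0 :: b1 :: b2 :: rest)) ∘
        (fun k : Nat => 0 + 3 * (k : Int))) 0
        = some (PySem.Dict.getD GENETIC_CODE (String.ofList [b0, b1, b2]) 'X') := by
      simp only [Function.comp_apply]
      have h00 : (0 + 3 * ((0 : Nat) : Int)) = 0 := by norm_num
      rw [h00, aaOf_head]
    rw [List.filterMap_cons_some hhead, List.filterMap_map]
    have htail : ∀ k ∈ List.range (if (0 : Int) < ((rest.length : Nat) : Int)
          then ((((rest.length : Nat) : Int) - 0 + 3 - 1) / 3).toNat else 0),
        ((aaOf (String.ofList (b0 :: b1 :: b2 :: rest)) ∘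
          (fun k : Nat => 0 + 3 * (k : Int))) ∘ Nat.succ) k
          = (aaOf (String.ofList rest) ∘ (fun k : Nat => 0 + 3 * (k : Int))) k := by
      intro k _
      simp only [Function.comp_apply]
      have h1 : (0 + 3 * ((Nat.succ k : Nat) : Int)) = 3 * (k : Int) + 3 := by push_cast; ring
      have h2 : (0 + 3 * ((k : Nat) : Int)) = 3 * (k : Int) := by ring
      rw [h1, h2, aaOf_shift]
    rw [List.filterMap_congr htail, ih, trans3, decode_eq]
  | case2 t ht =>
    have hlen : t.length < 3 := by
      rcases t with _ | ⟨a, _ | ⟨b, _ | ⟨c, r⟩⟩⟩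
      · simp
      · simp
      · simp
      · exact absurd rfl (fun h => ht a b c r h)
    have htr : trans3 t = [] := by
      rcases t with _ | ⟨a, _ | ⟨b, _ | ⟨c, r⟩⟩⟩
      · rfl
      · rfl
      · rfl
      · exact absurd rfl (fun h => ht a b c r h)
    rw [aas, PySem.List.pyRange_of_pos 0 _ (by norm_num), List.filterMap_map, htr]
    rcases Nat.lt_or_ge 0 t.length with hpos | hzero
    · have hm : (if (0 : Int) < ((t.length : Nat) : Int)
          then ((((t.length : Nat) : Int) - 0 + 3 - 1) / 3).toNat else 0) = 1 := by
        split_ifs with h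
        · omega
        · exfalso; apply h; exact_mod_cast hpos
      rw [hm]
      have hr1 : List.range 1 = [0] := rfl
      rw [hr1]
      have h0 : (aaOf (String.ofList t) ∘ (fun k : Nat => 0 + 3 * (k : Int))) 0 = none := by
        simp only [Function.comp_apply]
        have h00 : (0 + 3 * ((0 : Nat) : Int)) = 0 := by norm_num
        rw [h00, aaOf_short t hlen]
      rw [List.filterMap_cons_none h0]
      rfl
    · have hz : t.length = 0 := by omega
      have hm : (if (0 : Int) < ((t.length : Nat) : Int)
          then ((((t.length : Nat) : Int) - 0 + 3 - 1) / 3).toNat else 0) = 0 := by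
        rw [hz]; norm_num
      rw [hm]
      rfl

-- ===== VERDICT (by name: the statement is the Claim_ definition above) =====
theorem optimize_sequence_spec : Claim_equal_optimize_sequence := by
  intro s _
  show optimize_sequence s = optimize_sequence_alt s
  have hT : (translate_dna s).toList = trans3 s.toList := by
    have h1 : translate_dna s = (PySem.List.pyRange 0 (PySem.Str.len s) 3).foldl (stepT s) "" := rfl
    rw [h1, foldl_translate]
    have h2 := aas_eq s.toList
    rw [String.ofList_toList] at h2
    have hlen : PySem.Str.len s = ((s.toList.length : Nat) : Int) := rfl
    rw [hlen, h2]
    rfl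
  have hA : optimize_sequence s
      = ((PySem.List.enumerate (translate_dna s).toList 0).foldl (fun o p => gA o p.2) "",
         translate_dna s) := rfl
  have hB : optimize_sequence_alt s
      = (PySem.Str.join "" (encList (trans3 s.toList)), String.ofList (trans3 s.toList)) := by
    show (PySem.Str.join "" (optSeqGo s.toList [] []).1,
          String.ofList (optSeqGo s.toList [] []).2) = _
    rw [go_spec]
    simp
  rw [hA, hB, foldl_enum_snd gA, hT]
  refine Prod.ext ?_ ?_
  · show (trans3 s.toList).foldl gA "" = PySem.Str.join "" (encList (trans3 s.toList))
    apply str_ext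
    rw [fold_gA _ "" (trans3_mem s.toList), PySem.Str.toList_join]
    rfl
  · show translate_dna s = String.ofList (trans3 s.toList)
    rw [← hT, String.ofList_toList]
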